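-- pv_equiv track=rewrite | github.com/thecuriobot-debug/1n2.org | thunt.net/fetch_posters.py | guess_genre
-- ===== SOURCE A (Python) =====
-- def guess_genre(name, director):
--     nl, dl = name.lower(), director.lower()
--     if 'star trek' in nl or 'star wars' in nl or 'space' in nl or 'matrix' in nl or 'fifth element' in nl or 'stargate' in nl:
--         return 'Sci-Fi'
--     elif 'kubrick' in dl:
--         return 'Kubrick'
--     elif 'tarantino' in dl or 'scorsese' in dl or 'heat' in nl or 'goodfellas' in nl or 'casino' in nl:
--         return 'Crime'
--     elif 'austin' in nl or 'lebowski' in nl or 'animal house' in nl or 'ghostbusters' in nl or 'clerks' in nl: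
--         return 'Comedy'
--     elif 'allen' in dl:
--         return 'Woody Allen'
--     elif any(w in nl for w in ['hunt', 'mission', 'rock', 'top gun']):
--         return 'Action'
--     else:
--         return 'Drama'
-- ===== SOURCE B (Python) =====
-- # Reverse-priority overwrite scan: one flat pattern list, lowest priority first;
-- # every pattern is tested and each match overwrites the accumulator, so the
-- # last (= highest-priority) match wins.  No early return, no per-label grouping.
-- PATTERNS = [  # (substring, field, label), LOWEST priority first
--     ('hunt', 'n', 'Action'), ('mission', 'n', 'Action'),
--     ('rock', 'n', 'Action'), ('top gun', 'n', 'Action'),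
--     ('allen', 'd', 'Woody Allen'),
--     ('austin', 'n', 'Comedy'), ('lebowski', 'n', 'Comedy'),
--     ('animal house', 'n', 'Comedy'), ('ghostbusters', 'n', 'Comedy'),
--     ('clerks', 'n', 'Comedy'),
--     ('tarantino', 'd', 'Crime'), ('scorsese', 'd', 'Crime'),
--     ('heat', 'n', 'Crime'), ('goodfellas', 'n', 'Crime'),
--     ('casino', 'n', 'Crime'),
--     ('kubrick', 'd', 'Kubrick'),
--     ('star trek', 'n', 'Sci-Fi'), ('star wars', 'n', 'Sci-Fi'),
--     ('space', 'n', 'Sci-Fi'), ('matrix', 'n', 'Sci-Fi'),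
--     ('fifth element', 'n', 'Sci-Fi'), ('stargate', 'n', 'Sci-Fi'),
-- ]
--
-- def guess_genre(name, director):
--     texts = {'n': name.lower(), 'd': director.lower()}
--     genre = 'Drama'
--     for sub, field, label in PATTERNS:
--         if sub in texts[field]:
--             genre = label
--     return genre
-- ===== Notes on version B (the rewrite author's own statement) =====
-- stated objective: alternative
-- what changed: Replaced the early-return if/elif chain by an exhaustive fold over one flat (substring, field, label) list in reverse priority order with an overwrite accumulator, so the last match wins instead of the first branch.
import Mathlib
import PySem

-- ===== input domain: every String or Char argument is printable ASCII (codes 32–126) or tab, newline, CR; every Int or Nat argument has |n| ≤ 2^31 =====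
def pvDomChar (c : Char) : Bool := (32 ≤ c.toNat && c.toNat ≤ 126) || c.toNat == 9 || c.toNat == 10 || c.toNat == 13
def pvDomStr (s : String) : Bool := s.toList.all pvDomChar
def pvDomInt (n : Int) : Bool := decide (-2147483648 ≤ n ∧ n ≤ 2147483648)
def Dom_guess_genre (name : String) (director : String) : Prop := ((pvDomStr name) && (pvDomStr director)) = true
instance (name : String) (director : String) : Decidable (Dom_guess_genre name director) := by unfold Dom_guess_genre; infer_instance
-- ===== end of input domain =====

set_option maxHeartbeats 1600000

-- B replaces A's early-return if/elif chain by an exhaustive overwrite fold over a flat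
-- pattern list in reverse priority order (last match wins); objective: alternative.


-- ===== PORT A =====
def guess_genre (name : String) (director : String) : String :=
  let nl := PySem.Str.lower name
  let dl := PySem.Str.lower director
  if PySem.Str.isIn "star trek" nl || PySem.Str.isIn "star wars" nl || PySem.Str.isIn "space" nl ||
     PySem.Str.isIn "matrix" nl || PySem.Str.isIn "fifth element" nl || PySem.Str.isIn "stargate" nl then
    "Sci-Fi"
  else if PySem.Str.isIn "kubrick" dl then
    "Kubrick"
  else if PySem.Str.isIn "tarantino" dl || PySem.Str.isIn "scorsese" dl || PySem.Str.isIn "heat" nl ||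
          PySem.Str.isIn "goodfellas" nl || PySem.Str.isIn "casino" nl then
    "Crime"
  else if PySem.Str.isIn "austin" nl || PySem.Str.isIn "lebowski" nl || PySem.Str.isIn "animal house" nl ||
          PySem.Str.isIn "ghostbusters" nl || PySem.Str.isIn "clerks" nl then
    "Comedy"
  else if PySem.Str.isIn "allen" dl then
    "Woody Allen"
  else if (["hunt", "mission", "rock", "top gun"] : List String).any (fun w => PySem.Str.isIn w nl) then
    "Action"
  else
    "Drama"

-- ===== PORT B =====
-- flat (substring, field, label) list, LOWEST priority first (Source B's PATTERNS)
def ggPatterns : List (String × String × String) :=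
  [ ("hunt", "n", "Action"), ("mission", "n", "Action"),
    ("rock", "n", "Action"), ("top gun", "n", "Action"),
    ("allen", "d", "Woody Allen"),
    ("austin", "n", "Comedy"), ("lebowski", "n", "Comedy"),
    ("animal house", "n", "Comedy"), ("ghostbusters", "n", "Comedy"),
    ("clerks", "n", "Comedy"),
    ("tarantino", "d", "Crime"), ("scorsese", "d", "Crime"),
    ("heat", "n", "Crime"), ("goodfellas", "n", "Crime"),
    ("casino", "n", "Crime"),
    ("kubrick", "d", "Kubrick"),
    ("star trek", "n", "Sci-Fi"), ("star wars", "n", "Sci-Fi"),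
    ("space", "n", "Sci-Fi"), ("matrix", "n", "Sci-Fi"),
    ("fifth element", "n", "Sci-Fi"), ("stargate", "n", "Sci-Fi") ]

def guess_genre_alt (name : String) (director : String) : String :=
  let texts : PySem.Dict String String :=
    (PySem.Dict.empty.insert "n" (PySem.Str.lower name)).insert "d" (PySem.Str.lower director)
  ggPatterns.foldl
    (fun genre p =>
      -- texts[field]: both keys always present, so getD's default is never used
      if PySem.Str.isIn p.1 (texts.getD p.2.1 "") then p.2.2 else genre)
    "Drama"

-- ===== PRECONDITION & SPEC =====
def Spec_guess_genre (name : String) (director : String) (out : String) : Prop := out = guess_genre_alt name director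
instance (name : String) (director : String) (out : String) : Decidable (Spec_guess_genre name director out) := by unfold Spec_guess_genre; infer_instance

-- ===== CLAIM =====
def Claim_equal_guess_genre : Prop := ∀ (name : String) (director : String), Dom_guess_genre name director → Spec_guess_genre name director (guess_genre name director)

-- ===== LEMMAS AND PROOFS =====

-- overwrite-fold = first match on the reversed list
theorem foldl_overwrite_eq_find_reverse {α β : Type} (c : α → Bool) (v : α → β)
    (l : List α) (a : β) :
    l.foldl (fun g p => if c p then v p else g) a =
      (match l.reverse.find? c with | some p => v p | none => a) := by
  induction l generalizing a with
  | nil => rfl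
  | cons x xs ih =>
    simp only [List.foldl_cons, List.reverse_cons, ih]
    rcases h : xs.reverse.find? c with _ | p
    · rw [List.find?_append, h]
      cases hc : c x <;> simp [List.find?, hc]
    · rw [List.find?_append, h]
      simp [Option.or]

-- the per-pattern test B's fold applies (with the two-entry dict already built)
def ggCnd (nl dl : String) (p : String × String × String) : Bool :=
  PySem.Str.isIn p.1
    (((PySem.Dict.empty.insert "n" nl).insert "d" dl : PySem.Dict String String).getD p.2.1 "")

-- ggPatterns reversed, split into the six priority groups (highest first)
def gSci : List (String × String × String) :=
  [("stargate", "n", "Sci-Fi"), ("fifth element", "n", "Sci-Fi"), ("matrix", "n", "Sci-Fi"),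
   ("space", "n", "Sci-Fi"), ("star wars", "n", "Sci-Fi"), ("star trek", "n", "Sci-Fi")]
def gKub : List (String × String × String) := [("kubrick", "d", "Kubrick")]
def gCri : List (String × String × String) :=
  [("casino", "n", "Crime"), ("goodfellas", "n", "Crime"), ("heat", "n", "Crime"),
   ("scorsese", "d", "Crime"), ("tarantino", "d", "Crime")]
def gCom : List (String × String × String) :=
  [("clerks", "n", "Comedy"), ("ghostbusters", "n", "Comedy"), ("animal house", "n", "Comedy"),
   ("lebowski", "n", "Comedy"), ("austin", "n", "Comedy")]
def gAll : List (String × String × String) := [("allen", "d", "Woody Allen")]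
def gAct : List (String × String × String) :=
  [("top gun", "n", "Action"), ("rock", "n", "Action"), ("mission", "n", "Action"),
   ("hunt", "n", "Action")]

theorem ggPatterns_reverse :
    ggPatterns.reverse = gSci ++ gKub ++ gCri ++ gCom ++ gAll ++ gAct := by
  decide

-- ===== VERDICT =====
theorem guess_genre_spec : Claim_equal_guess_genre := by
  intro name director _
  unfold Spec_guess_genre guess_genre guess_genre_alt
  simp only []
  rw [show (fun (genre : String) (p : String × String × String) =>
        if PySem.Str.isIn p.1
            (((PySem.Dict.empty.insert "n" (PySem.Str.lower name)).insert "d"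
                (PySem.Str.lower director) : PySem.Dict String String).getD p.2.1 "")
          then p.2.2 else genre) =
      (fun g p => if ggCnd (PySem.Str.lower name) (PySem.Str.lower director) p then
        (fun q : String × String × String => q.2.2) p else g) from rfl]
  rw [foldl_overwrite_eq_find_reverse, ggPatterns_reverse]
  rw [List.find?_append, List.find?_append, List.find?_append, List.find?_append,
    List.find?_append]
  rcases h1 : List.find? (ggCnd (PySem.Str.lower name) (PySem.Str.lower director)) gSci with _ | p
  case some =>
    have hc := List.find?_some h1
    have hm := List.mem_of_find?_eq_some h1
    fin_cases hm <;>
      simp_all [ggCnd, gSci, PySem.Dict.getD, PySem.Dict.get?, PySem.Dict.insert, PySem.Dict.empty]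
  have hn1 := List.find?_eq_none.mp h1
  simp only [gSci, List.mem_cons, List.not_mem_nil] at hn1
  rcases h2 : List.find? (ggCnd (PySem.Str.lower name) (PySem.Str.lower director)) gKub with _ | p
  case some =>
    have hc := List.find?_some h2
    have hm := List.mem_of_find?_eq_some h2
    fin_cases hm <;>
      simp_all [ggCnd, gKub, PySem.Dict.getD, PySem.Dict.get?, PySem.Dict.insert, PySem.Dict.empty]
  have hn2 := List.find?_eq_none.mp h2
  simp only [gKub, List.mem_cons, List.not_mem_nil] at hn2
  rcases h3 : List.find? (ggCnd (PySem.Str.lower name) (PySem.Str.lower director)) gCri with _ | p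
  case some =>
    have hc := List.find?_some h3
    have hm := List.mem_of_find?_eq_some h3
    fin_cases hm <;>
      simp_all [ggCnd, gCri, PySem.Dict.getD, PySem.Dict.get?, PySem.Dict.insert, PySem.Dict.empty]
  have hn3 := List.find?_eq_none.mp h3
  simp only [gCri, List.mem_cons, List.not_mem_nil] at hn3
  rcases h4 : List.find? (ggCnd (PySem.Str.lower name) (PySem.Str.lower director)) gCom with _ | p
  case some =>
    have hc := List.find?_some h4
    have hm := List.mem_of_find?_eq_some h4
    fin_cases hm <;>
      simp_all [ggCnd, gCom, PySem.Dict.getD, PySem.Dict.get?, PySem.Dict.insert, PySem.Dict.empty]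
  have hn4 := List.find?_eq_none.mp h4
  simp only [gCom, List.mem_cons, List.not_mem_nil] at hn4
  rcases h5 : List.find? (ggCnd (PySem.Str.lower name) (PySem.Str.lower director)) gAll with _ | p
  case some =>
    have hc := List.find?_some h5
    have hm := List.mem_of_find?_eq_some h5
    fin_cases hm <;>
      simp_all [ggCnd, gAll, PySem.Dict.getD, PySem.Dict.get?, PySem.Dict.insert, PySem.Dict.empty]
  have hn5 := List.find?_eq_none.mp h5
  simp only [gAll, List.mem_cons, List.not_mem_nil] at hn5
  rcases h6 : List.find? (ggCnd (PySem.Str.lower name) (PySem.Str.lower director)) gAct with _ | p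
  case some =>
    have hc := List.find?_some h6
    have hm := List.mem_of_find?_eq_some h6
    fin_cases hm <;>
      simp_all [ggCnd, gAct, PySem.Dict.getD, PySem.Dict.get?, PySem.Dict.insert, PySem.Dict.empty]
  have hn6 := List.find?_eq_none.mp h6
  simp only [gAct, List.mem_cons, List.not_mem_nil] at hn6
  simp_all [ggCnd, PySem.Dict.getD, PySem.Dict.get?, PySem.Dict.insert, PySem.Dict.empty]
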